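-- pv_equiv track=rewrite | github.com/Adams-Galaxy/emthpy | _emthpy_equations.py | find_var_in_str
-- ===== SOURCE A (Python) =====
-- def isvarchar(c: str) -> bool:
--     """Check if a character is a valid variable character."""
--     return c in "_abcdefghijklmnopqrstuvwxyzABCDEFGHIJKLMNOPQRSTUVWXYZ"
--
-- def find_var_in_str(str):
--     """Find a variable in a string."""
--     if len(str) == 1 or str[1] != '_':
--         return str[0]
--
--     result = ""
--     for c in str:
--         if isvarchar(c):
--             result += c
--         else:
--             return result
--     return result
-- ===== SOURCE B (Python) =====
-- def find_var_in_str(str):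
--     """Find a variable in a string."""
--     if str[1:2] != '_':
--         return str[0]
--     return _var_prefix(str)
--
-- def _var_prefix(s):
--     """Maximal leading run of variable characters, built recursively."""
--     if s and (s[0] == '_' or 'a' <= s[0] <= 'z' or 'A' <= s[0] <= 'Z'):
--         return s[0] + _var_prefix(s[1:])
--     return ""
-- ===== Notes on version B (the rewrite author's own statement) =====
-- stated objective: idiomatic
-- what changed: Replaces A's charset-membership guard and accumulator for-loop with early return by a slice guard str[1:2] != '_' and a recursive helper that builds the maximal leading run of variable characters using range comparisons.
-- outside the precondition, e.g. on find_var_in_str(''): A raises IndexError, B raises IndexError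
import Mathlib
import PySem

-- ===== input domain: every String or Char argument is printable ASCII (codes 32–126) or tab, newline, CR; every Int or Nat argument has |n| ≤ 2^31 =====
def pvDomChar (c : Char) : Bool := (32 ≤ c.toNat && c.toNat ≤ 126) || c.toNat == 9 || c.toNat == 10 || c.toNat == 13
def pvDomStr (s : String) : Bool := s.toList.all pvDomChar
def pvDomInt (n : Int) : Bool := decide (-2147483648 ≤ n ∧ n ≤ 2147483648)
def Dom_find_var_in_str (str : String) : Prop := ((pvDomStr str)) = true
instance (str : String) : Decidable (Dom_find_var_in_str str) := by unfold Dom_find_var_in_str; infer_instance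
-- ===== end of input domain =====

-- B replaces A's accumulator for-loop (membership test in a charset string, early return)
-- by an idiomatic slice guard str[1:2] != '_' plus a recursive prefix builder using range
-- comparisons; return value only — no mutation involved.

-- ===== PORT A =====
-- module helper of A: c in "_abc…XYZ"
def isvarcharL (c : Char) : Bool :=
  "_abcdefghijklmnopqrstuvwxyzABCDEFGHIJKLMNOPQRSTUVWXYZ".toList.contains c

-- the for-loop of A: result += c while varchar, early return on the first non-varchar
def fvLoop : List Char → List Char → List Char
  | [], acc => acc
  | c :: cs, acc => if isvarcharL c then fvLoop cs (acc ++ [c]) else acc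

def find_var_in_str (str : String) : String :=
  if str.toList.length = 1 ∨ str.toList.getD 1 ' ' ≠ '_' then String.ofList [str.toList.getD 0 ' ']
  else String.ofList (fvLoop str.toList [])

-- ===== PORT B =====
-- B's helper: recursive maximal run of variable characters (range comparisons)
def varPrefix : List Char → List Char
  | [] => []
  | c :: cs =>
    if c == '_' || ('a' ≤ c && c ≤ 'z') || ('A' ≤ c && c ≤ 'Z') then c :: varPrefix cs
    else []

def find_var_in_str_alt (str : String) : String :=
  if PySem.List.slice str.toList (some 1) (some 2) ≠ ['_'] then String.ofList [str.toList.getD 0 ' ']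
  else String.ofList (varPrefix str.toList)

-- ===== PRECONDITION & SPEC =====
-- A raises IndexError at str[1] on the empty string; Pre_ excludes only that input.
def Pre_find_var_in_str (str : String) : Prop := str.toList ≠ []
instance (str : String) : Decidable (Pre_find_var_in_str str) := by unfold Pre_find_var_in_str; infer_instance
def pvWitness_find_var_in_str : String := "x_y2"

def Spec_find_var_in_str (str : String) (out : String) : Prop := out = find_var_in_str_alt str
instance (str : String) (out : String) : Decidable (Spec_find_var_in_str str out) := by unfold Spec_find_var_in_str; infer_instance

-- ===== CLAIM (what is proved, stated in full; the proofs are below) =====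
def Claim_equal_find_var_in_str : Prop := ∀ (str : String), Dom_find_var_in_str str → Pre_find_var_in_str str → Spec_find_var_in_str str (find_var_in_str str)

-- ===== LEMMAS AND PROOFS =====
-- on domain characters the two varchar tests agree (checked over the finite ASCII range)
set_option maxRecDepth 4000 in
lemma varchar_agree (c : Char) (h : pvDomChar c = true) :
    isvarcharL c = (c == '_' || ('a' ≤ c && c ≤ 'z') || ('A' ≤ c && c ≤ 'Z')) := by
  have hlt : c.toNat < 127 := by
    simp only [pvDomChar, Bool.or_eq_true, Bool.and_eq_true, decide_eq_true_eq,
      Nat.beq_eq_true_eq] at h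
    omega
  have hall : ∀ n < 127, isvarcharL (Char.ofNat n) =
      ((Char.ofNat n) == '_' || ('a' ≤ (Char.ofNat n) && (Char.ofNat n) ≤ 'z') ||
       ('A' ≤ (Char.ofNat n) && (Char.ofNat n) ≤ 'Z')) := by
    decide
  have := hall c.toNat hlt
  rwa [Char.ofNat_toNat] at this

lemma fvLoop_eq_varPrefix (cs : List Char) (hdom : ∀ c ∈ cs, pvDomChar c = true)
    (acc : List Char) : fvLoop cs acc = acc ++ varPrefix cs := by
  induction cs generalizing acc with
  | nil => simp [fvLoop, varPrefix]
  | cons c cs ih =>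
    have hc := varchar_agree c (hdom c (by simp))
    by_cases h : isvarcharL c = true
    · have hv : (c == '_' || ('a' ≤ c && c ≤ 'z') || ('A' ≤ c && c ≤ 'Z')) = true := by
        rw [← hc]; exact h
      simp [fvLoop, varPrefix, h, hv, ih (fun d hd => hdom d (by simp [hd]))]
    · have hv : ¬ (c == '_' || ('a' ≤ c && c ≤ 'z') || ('A' ≤ c && c ≤ 'Z')) = true := by
        rw [← hc]; exact h
      simp [fvLoop, varPrefix, h, hv]

-- the two guards agree on nonempty input: str[1:2] != '_'  ↔  len==1 or str[1] != '_'
lemma guard_agree (cs : List Char) (hne : cs ≠ []) :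
    (PySem.List.slice cs (some 1) (some 2) ≠ ['_']) ↔ (cs.length = 1 ∨ cs.getD 1 ' ' ≠ '_') := by
  match cs, hne with
  | [c], _ => simp [PySem.List.slice]
  | c :: d :: cs, _ =>
    have : PySem.List.slice (c :: d :: cs) (some 1) (some 2) = [d] := by
      have := PySem.List.slice_natCast (c :: d :: cs) 1 2
      simpa using this
    simp [this, List.getD]

-- ===== VERDICT (by name: the statement is the Claim_ definition above) =====
theorem find_var_in_str_spec : Claim_equal_find_var_in_str := by
  intro str hdom hpre
  unfold Spec_find_var_in_str find_var_in_str find_var_in_str_alt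
  have hdom' : ∀ c ∈ str.toList, pvDomChar c = true := by
    simpa [Dom_find_var_in_str, pvDomStr, List.all_eq_true] using hdom
  have hg := guard_agree str.toList hpre
  by_cases h : str.toList.length = 1 ∨ str.toList.getD 1 ' ' ≠ '_'
  · rw [if_pos h, if_pos (hg.mpr h)]
  · rw [if_neg h, if_neg (fun hh => h (hg.mp hh)), fvLoop_eq_varPrefix _ hdom' []]
    simp
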